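-- pv_equiv track=rewrite | github.com/johntelforduk/advent-of-code-2021 | 18-snailfish/solution18.py | first_10_or_more
-- ===== SOURCE A (Python) =====
-- def first_10_or_more(s: str) -> (int, int):
--     start_num, end_num = None, None
--     for i in range(len(s)):
--         if s[i].isdigit():
--             if start_num is None:
--                 start_num = i
--         else:                           # Not a digit.
--             if start_num is not None and end_num is None:
--                 end_num = i - 1         # Gatepost!
--                 if start_num == end_num:        # 1 digit number, so restart the search.
--                     start_num, end_num = None, None
--
--
--     # Deal with all digits string case.
--     if start_num is not None and end_num is None:
--         end_num = len(s) - 1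
--         if start_num == end_num:  # 1 digit number.
--             return (None, None)
--
--     return start_num, end_num
-- ===== SOURCE B (Python) =====
-- def first_10_or_more(s: str) -> (int, int):
--     n = len(s)
--     i = 0
--     while i < n:
--         if s[i].isdigit():
--             j = i + 1
--             while j < n and s[j].isdigit():
--                 j += 1
--             if j - i >= 2:
--                 return (i, j - 1)
--             i = j
--         else:
--             i += 1
--     return (None, None)
-- ===== Notes on version B (the rewrite author's own statement) =====
-- stated objective: simpler
-- what changed: B replaces A's stateful start/end-sentinel scan with gatepost fixups by a direct run-skipping scan: at each digit it measures the maximal digit run and returns its span if it has length >= 2, otherwise skips on; no None-sentinel bookkeeping or end-of-string special case.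
import Mathlib
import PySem

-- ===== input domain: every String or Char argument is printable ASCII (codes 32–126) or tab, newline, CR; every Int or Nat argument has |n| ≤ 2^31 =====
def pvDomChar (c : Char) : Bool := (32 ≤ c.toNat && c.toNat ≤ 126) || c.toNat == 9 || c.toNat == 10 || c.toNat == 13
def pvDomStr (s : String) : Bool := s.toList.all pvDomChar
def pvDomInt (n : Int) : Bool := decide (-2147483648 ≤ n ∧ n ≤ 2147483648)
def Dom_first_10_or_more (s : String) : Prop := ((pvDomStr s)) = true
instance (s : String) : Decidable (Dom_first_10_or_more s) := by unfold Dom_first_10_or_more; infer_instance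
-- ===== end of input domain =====

-- B replaces A's stateful start/end-sentinel scan (with its gatepost fixups and
-- end-of-string special case) by a direct run-skipping scan: at each digit it measures
-- the maximal digit run and returns its span if the run has length >= 2. Same cost.

-- ===== PORT A =====
-- one loop iteration of A: state (start_num, end_num), index i, character s[i]
def pvStepA (st : Option Int × Option Int) (i : Int) (c : Char) : Option Int × Option Int :=
  if PySem.Chars.isdigit c then
    match st with
    | (none, en) => (some i, en)
    | _ => st
  else
    match st with
    | (some a, none) =>
        if a = i - 1 then (none, none) else (some a, some (i - 1))
    | _ => st

def pvLoopA : List Char → Int → Option Int × Option Int → Option Int × Option Int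
  | [], _, st => st
  | c :: r, i, st => pvLoopA r (i + 1) (pvStepA st i c)

-- the trailing "all digits at the end of the string" fixup of A
def pvFinA (st : Option Int × Option Int) (n : Int) : Option Int × Option Int :=
  match st with
  | (some a, none) => if a = n - 1 then (none, none) else (some a, some (n - 1))
  | st => st

def first_10_or_more (s : String) : Option Int × Option Int :=
  pvFinA (pvLoopA s.toList 0 (none, none)) (s.toList.length : Int)

-- ===== PORT B =====
-- inner while loop of B: length of the maximal digit run at the front
def pvRunLen : List Char → Int
  | [] => 0
  | c :: r => if PySem.Chars.isdigit c then pvRunLen r + 1 else 0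

-- outer while loop of B (i is the absolute index of the head of the list)
def pvScanB : List Char → Int → Option Int × Option Int
  | [], _ => (none, none)
  | c :: r, i =>
    if PySem.Chars.isdigit c then
      if 1 + pvRunLen r ≥ 2 then (some i, some (i + pvRunLen r))
      else pvScanB r (i + 1)
    else pvScanB r (i + 1)

def first_10_or_more_alt (s : String) : Option Int × Option Int :=
  pvScanB s.toList 0

-- ===== PRECONDITION & SPEC =====
def Spec_first_10_or_more (s : String) (out : Option Int × Option Int) : Prop := out = first_10_or_more_alt s
instance (s : String) (out : Option Int × Option Int) : Decidable (Spec_first_10_or_more s out) := by unfold Spec_first_10_or_more; infer_instance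

-- ===== CLAIM (what is proved, stated in full; the proofs are below) =====
def Claim_equal_first_10_or_more : Prop := ∀ (s : String), Dom_first_10_or_more s → Spec_first_10_or_more s (first_10_or_more s)

-- ===== LEMMAS AND PROOFS =====

lemma pvRunLen_nonneg (l : List Char) : 0 ≤ pvRunLen l := by
  induction l with
  | nil => simp [pvRunLen]
  | cons c r ih => simp only [pvRunLen]; split <;> omega

lemma pvRunLen_le_length (l : List Char) : pvRunLen l ≤ (l.length : Int) := by
  induction l with
  | nil => simp [pvRunLen]
  | cons c r ih => simp only [pvRunLen, List.length_cons]; split <;> push_cast <;> omega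

-- once both components are set, A's loop never changes the state again
lemma pvLoopA_done (l : List Char) : ∀ (i a b : Int),
    pvLoopA l i (some a, some b) = (some a, some b) := by
  induction l with
  | nil => intro i a b; rfl
  | cons c r ih =>
    intro i a b
    simp only [pvLoopA, pvStepA]
    split <;> exact ih _ _ _

-- A's loop from an in-run state (start at a, run still open), entered at index j
lemma pvLoopA_run (l : List Char) : ∀ (j a : Int), a ≤ j - 1 →
    pvLoopA l j (some a, none) =
      if (l.length : Int) ≤ pvRunLen l then (some a, none)
      else if a = j + pvRunLen l - 1
      then pvLoopA (l.drop ((pvRunLen l).toNat + 1)) (j + pvRunLen l + 1) (none, none)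
      else (some a, some (j + pvRunLen l - 1)) := by
  induction l with
  | nil => intro j a _; simp [pvLoopA, pvRunLen]
  | cons c r ih =>
    intro j a ha
    by_cases hc : PySem.Chars.isdigit c = true
    · have hr := pvRunLen_nonneg r
      simp only [pvLoopA, pvStepA, hc, if_pos]
      rw [ih (j + 1) a (by omega)]
      have hrw : pvRunLen (c :: r) = pvRunLen r + 1 := by simp [pvRunLen, hc]
      simp only [hrw, List.length_cons]
      rw [show (pvRunLen r + 1).toNat + 1 = ((pvRunLen r).toNat + 1) + 1 by omega]
      simp only [List.drop_succ_cons]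
      simp only [show (((r.length + 1 : Nat)) : Int) = (r.length : Int) + 1 by push_cast; ring]
      simp only [show ((r.length : Int) + 1 ≤ pvRunLen r + 1) = ((r.length : Int) ≤ pvRunLen r) by
          simp only [eq_iff_iff]; constructor <;> intro <;> omega,
        show j + (pvRunLen r + 1) - 1 = j + 1 + pvRunLen r - 1 by ring,
        show j + (pvRunLen r + 1) + 1 = j + 1 + pvRunLen r + 1 by ring]
    · have hrl : pvRunLen (c :: r) = 0 := by simp [pvRunLen, hc]
      rw [hrl]
      rw [if_neg (by simp only [List.length_cons]; push_cast; omega)]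
      simp only [Int.toNat_zero, Nat.zero_add, List.drop_one, List.tail_cons]
      simp only [pvLoopA, pvStepA, hc, Bool.not_eq_true, if_neg]
      by_cases hae : a = j - 1
      · rw [if_pos hae, if_pos (by omega : a = j + 0 - 1)]; norm_num
      · rw [if_neg hae, if_neg (by omega : ¬ a = j + 0 - 1), pvLoopA_done]; norm_num

-- main invariant: A's loop-plus-fixup from the empty state equals B's scan
lemma pvMain (l : List Char) : ∀ (j : Int),
    pvFinA (pvLoopA l j (none, none)) (j + (l.length : Int)) = pvScanB l j := by
  suffices h : ∀ (n : Nat) (l : List Char), l.length ≤ n → ∀ (j : Int),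
      pvFinA (pvLoopA l j (none, none)) (j + (l.length : Int)) = pvScanB l j by
    intro j; exact h l.length l le_rfl j
  intro n
  induction n with
  | zero =>
    intro l hl j
    match l, hl with
    | [], _ => rfl
  | succ n ihn =>
    intro l hl
    have ih : ∀ (l' : List Char), l'.length < l.length → ∀ (j : Int),
        pvFinA (pvLoopA l' j (none, none)) (j + (l'.length : Int)) = pvScanB l' j := by
      intro l' hl' j; exact ihn l' (by omega) j
    match l with
    | [] => intro j; rfl
    | c :: r =>
      intro j
      by_cases hc : PySem.Chars.isdigit c = true
      · simp only [pvLoopA, pvStepA, hc, if_pos, pvScanB]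
        rw [pvLoopA_run r (j + 1) j (by omega)]
        have hk0 := pvRunLen_nonneg r
        have hkl := pvRunLen_le_length r
        by_cases hk : pvRunLen r = 0
        · rw [if_neg (by omega : ¬ (1 + pvRunLen r ≥ 2))]
          match r with
          | [] =>
            rw [if_pos (by simp [pvRunLen])]
            simp only [pvFinA, pvScanB, List.length_cons, List.length_nil]
            rw [if_pos (by push_cast; ring)]
          | d :: rest =>
            have hd : PySem.Chars.isdigit d = false := by
              by_contra h
              simp only [Bool.not_eq_false] at h
              simp [pvRunLen, h] at hk
              have := pvRunLen_nonneg rest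
              omega
            rw [if_neg (by simp only [List.length_cons, hk]; push_cast; omega)]
            rw [if_pos (by omega : j = j + 1 + pvRunLen (d :: rest) - 1)]
            rw [show (pvRunLen (d :: rest)).toNat + 1 = 1 by omega]
            simp only [List.drop_one, List.tail_cons]
            have h1 : j + (((c :: d :: rest).length : Nat) : Int)
                = (j + 1 + pvRunLen (d :: rest) + 1) + (rest.length : Int) := by
              simp only [List.length_cons, hk]; push_cast; omega
            rw [h1, ih rest (by simp) (j + 1 + pvRunLen (d :: rest) + 1)]
            rw [show j + 1 + pvRunLen (d :: rest) + 1 = j + 1 + 1 by omega]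
            simp [pvScanB, hd]
        · rw [if_pos (by omega : 1 + pvRunLen r ≥ 2)]
          by_cases hdr : (r.length : Int) ≤ pvRunLen r
          · rw [if_pos hdr]
            have hlen : (r.length : Int) = pvRunLen r := by omega
            simp only [pvFinA, List.length_cons]
            rw [if_neg (by push_cast; omega)]
            rw [show j + (((r.length + 1 : Nat)) : Int) - 1 = j + pvRunLen r by push_cast; omega]
          · rw [if_neg hdr]
            rw [if_neg (by omega : ¬ (j = j + 1 + pvRunLen r - 1))]
            simp only [pvFinA]
            rw [show j + 1 + pvRunLen r - 1 = j + pvRunLen r by ring]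
      · simp only [pvLoopA, pvStepA, hc, Bool.not_eq_true, if_neg, pvScanB]
        rw [show j + (((c :: r).length : Nat) : Int) = (j + 1) + (r.length : Int) by
          simp only [List.length_cons]; push_cast; ring]
        exact ih r (by simp) (j + 1)

-- ===== VERDICT (by name: the statement is the Claim_ definition above) =====
theorem first_10_or_more_spec : Claim_equal_first_10_or_more := by
  intro s _
  unfold Spec_first_10_or_more first_10_or_more first_10_or_more_alt
  have := pvMain s.toList 0
  simpa using this
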